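-- pv_equiv track=rewrite | github.com/comegrant/dbt_docs_test | projects/preselector/preselector/menu_feedback.py | check_overlap_new
-- ===== SOURCE A (Python) =====
-- PREVIOUS_WEEKS = 3
--
-- def check_overlap_new(
--     row: dict, old_recipes: dict[int, list[int]], max_var: int, target_week: int
-- ) -> tuple[bool, set[int]]:
--     if max_var == 0:
--         return True, set(row["match_recipes"])
--     elif max_var > PREVIOUS_WEEKS:
--         return False, set()
--
--     overlap_set = set(row["match_recipes"])
--
--     for i in range(1, max_var + 1):
--         previous_week = target_week - i
--         week_recipes = old_recipes.get(previous_week, [])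
--         overlap_set = overlap_set & set(week_recipes)
--         if not overlap_set:
--             return False, set()
--
--     return True, overlap_set
-- ===== SOURCE B (Python) =====
-- PREVIOUS_WEEKS = 3
--
--
-- def check_overlap_new(row, old_recipes, max_var, target_week):
--     if max_var <= 0:
--         # max_var == 0 keeps A's guard; a negative max_var makes A's loop empty,
--         # which is the same value this branch returns.
--         return True, set(row["match_recipes"])
--     if max_var > PREVIOUS_WEEKS:
--         return False, set()
--     week_sets = [set(old_recipes.get(target_week - i, [])) for i in range(1, max_var + 1)]
--     result = {r for r in set(row["match_recipes"]) if all(r in ws for ws in week_sets)}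
--     return bool(result), result
-- ===== Notes on version B (the rewrite author's own statement) =====
-- stated objective: alternative
-- what changed: Instead of accumulating a running intersection week-by-week with an early exit, B builds the list of previous-week recipe sets once and keeps each candidate recipe iff it is a member of every week set (loop transposed: outer over candidates, inner over weeks); emptiness is mapped to False by bool(result).
import Mathlib
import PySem

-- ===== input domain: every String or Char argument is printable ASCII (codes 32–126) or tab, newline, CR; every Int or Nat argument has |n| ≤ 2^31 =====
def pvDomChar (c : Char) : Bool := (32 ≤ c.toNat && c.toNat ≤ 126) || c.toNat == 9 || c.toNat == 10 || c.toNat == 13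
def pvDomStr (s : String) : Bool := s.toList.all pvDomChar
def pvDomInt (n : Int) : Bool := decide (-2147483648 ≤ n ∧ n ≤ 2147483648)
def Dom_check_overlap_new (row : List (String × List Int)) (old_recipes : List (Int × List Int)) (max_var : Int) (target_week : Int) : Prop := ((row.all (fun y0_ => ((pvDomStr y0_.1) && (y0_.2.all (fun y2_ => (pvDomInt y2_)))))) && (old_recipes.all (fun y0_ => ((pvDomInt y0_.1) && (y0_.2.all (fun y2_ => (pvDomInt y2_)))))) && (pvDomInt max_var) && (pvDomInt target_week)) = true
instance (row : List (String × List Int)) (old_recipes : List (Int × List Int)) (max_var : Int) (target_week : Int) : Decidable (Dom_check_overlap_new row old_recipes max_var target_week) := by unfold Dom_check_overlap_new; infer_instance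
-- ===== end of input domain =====

-- B transposes A's loop: it builds the previous-week sets once and keeps each candidate
-- recipe iff it belongs to every week set, instead of a running intersection with early exit
-- (objective: alternative, same cost).

-- ===== PORT A =====
-- the 'for i in range(1, max_var+1)' loop with its early 'return False, set()';
-- state = overlap_set
-- dict.get(k, default): first-match association lookup (the dicts have unique keys)
def pvALoop (old_recipes : List (Int × List Int)) (target_week : Int) :
    List Int → List Int → Bool × List Int
  | ov, [] => (true, ov)
  | ov, i :: rest =>
      let week_recipes := (List.lookup (target_week - i) old_recipes).getD []
      let ov' := PySem.Set.inter ov (PySem.Set.ofList week_recipes)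
      if ov' = [] then (false, [])
      else pvALoop old_recipes target_week ov' rest

-- row["match_recipes"] is ported as getD with default []; it is exact under
-- Pre_check_overlap_new, which excludes the KeyError case.
def check_overlap_new (row : List (String × List Int)) (old_recipes : List (Int × List Int)) (max_var : Int) (target_week : Int) : Bool × List Int :=
  if max_var = 0 then (true, PySem.Set.ofList ((List.lookup "match_recipes" row).getD []))
  else if max_var > 3 then (false, [])
  else
    pvALoop old_recipes target_week
      (PySem.Set.ofList ((List.lookup "match_recipes" row).getD []))
      (PySem.List.pyRange 1 (max_var + 1) 1)

-- ===== PORT B =====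
def check_overlap_new_alt (row : List (String × List Int)) (old_recipes : List (Int × List Int)) (max_var : Int) (target_week : Int) : Bool × List Int :=
  if max_var ≤ 0 then (true, PySem.Set.ofList ((List.lookup "match_recipes" row).getD []))
  else if max_var > 3 then (false, [])
  else
    let week_sets := (PySem.List.pyRange 1 (max_var + 1) 1).map
      (fun i => PySem.Set.ofList ((List.lookup (target_week - i) old_recipes).getD []))
    let result := (PySem.Set.ofList ((List.lookup "match_recipes" row).getD [])).filter
      (fun r => week_sets.all (fun ws => PySem.Set.contains ws r))
    (!result.isEmpty, result)

-- ===== PRECONDITION & SPEC =====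
-- Pre_ excludes exactly the inputs where A raises KeyError: row without a "match_recipes" key,
-- unless max_var > 3 (then A returns before touching row).
def Pre_check_overlap_new (row : List (String × List Int)) (old_recipes : List (Int × List Int)) (max_var : Int) (target_week : Int) : Prop :=
  "match_recipes" ∈ row.map Prod.fst ∨ max_var > 3
instance (row : List (String × List Int)) (old_recipes : List (Int × List Int)) (max_var : Int) (target_week : Int) : Decidable (Pre_check_overlap_new row old_recipes max_var target_week) := by unfold Pre_check_overlap_new; infer_instance

def pvWitness_check_overlap_new : (List (String × List Int)) × (List (Int × List Int)) × Int × Int :=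
  ([("match_recipes", [1, 2])], [(4, [2, 3])], 1, 5)

def Spec_check_overlap_new (row : List (String × List Int)) (old_recipes : List (Int × List Int)) (max_var : Int) (target_week : Int) (out : Bool × List Int) : Prop := out = check_overlap_new_alt row old_recipes max_var target_week
instance (row : List (String × List Int)) (old_recipes : List (Int × List Int)) (max_var : Int) (target_week : Int) (out : Bool × List Int) : Decidable (Spec_check_overlap_new row old_recipes max_var target_week out) := by unfold Spec_check_overlap_new; infer_instance

-- ===== CLAIM (what is proved, stated in full; the proofs are below) =====
def Claim_equal_check_overlap_new : Prop := ∀ (row : List (String × List Int)) (old_recipes : List (Int × List Int)) (max_var : Int) (target_week : Int), Dom_check_overlap_new row old_recipes max_var target_week → Pre_check_overlap_new row old_recipes max_var target_week → Spec_check_overlap_new row old_recipes max_var target_week (check_overlap_new row old_recipes max_var target_week)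

-- ===== LEMMAS AND PROOFS =====

-- A's running intersection is B's conjunctive filter, as long as the loop never starts
-- with both an empty overlap set and an empty week list.
theorem pvALoop_eq_filter (old_recipes : List (Int × List Int)) (target_week : Int) :
    ∀ (is : List Int) (ov : List Int), (ov ≠ [] ∨ is ≠ []) →
    pvALoop old_recipes target_week ov is =
      (let res := ov.filter (fun r => is.all (fun i =>
          PySem.Set.contains (PySem.Set.ofList ((List.lookup (target_week - i) old_recipes).getD [])) r));
       (!res.isEmpty, res)) := by
  intro is
  induction is with
  | nil =>
      intro ov h
      rcases h with h | h
      · simp [pvALoop, h]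
      · exact absurd rfl h
  | cons i rest ih =>
      intro ov _
      simp only [pvALoop]
      have hinter : PySem.Set.inter ov
          (PySem.Set.ofList ((List.lookup (target_week - i) old_recipes).getD [])) =
          ov.filter (fun r =>
            PySem.Set.contains (PySem.Set.ofList ((List.lookup (target_week - i) old_recipes).getD [])) r) := rfl
      by_cases hz : PySem.Set.inter ov
          (PySem.Set.ofList ((List.lookup (target_week - i) old_recipes).getD [])) = []
      · rw [hinter] at hz
        rw [hinter, hz, if_pos rfl]
        have : ov.filter (fun r => (i :: rest).all (fun j =>
            PySem.Set.contains (PySem.Set.ofList ((List.lookup (target_week - j) old_recipes).getD [])) r)) = [] := by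
          rw [List.eq_nil_iff_forall_not_mem]
          intro r hr
          rw [List.mem_filter] at hr
          obtain ⟨hrov, hall⟩ := hr
          simp only [List.all_cons, Bool.and_eq_true] at hall
          have hmem : r ∈ List.filter (fun r =>
              (PySem.Set.ofList ((List.lookup (target_week - i) old_recipes).getD [])).contains r) ov := by
            rw [List.mem_filter]
            exact ⟨hrov, hall.1⟩
          rw [hz] at hmem
          exact absurd hmem (List.not_mem_nil)
        simp only [this]
        simp
      · rw [if_neg hz, ih _ (Or.inl hz)]
        simp only [hinter, List.filter_filter]
        have hfilt : List.filter (fun r =>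
            (rest.all fun j => (PySem.Set.ofList ((List.lookup (target_week - j) old_recipes).getD [])).contains r) &&
            (PySem.Set.ofList ((List.lookup (target_week - i) old_recipes).getD [])).contains r) ov =
            List.filter (fun r => (i :: rest).all fun j =>
              (PySem.Set.ofList ((List.lookup (target_week - j) old_recipes).getD [])).contains r) ov := by
          apply List.filter_congr
          intro r _
          simp [List.all_cons, Bool.and_comm]
        rw [hfilt]

-- ===== VERDICT (by name: the statement is the Claim_ definition above) =====
theorem check_overlap_new_spec : Claim_equal_check_overlap_new := by
  intro row old_recipes max_var target_week _ _
  unfold Spec_check_overlap_new check_overlap_new check_overlap_new_alt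
  by_cases h0 : max_var = 0
  · simp [h0]
  · rw [if_neg h0]
    by_cases h3 : max_var > 3
    · rw [if_pos h3, if_neg (by omega), if_pos h3]
    · rw [if_neg h3]
      by_cases hneg : max_var ≤ 0
      · -- negative max_var: A's range is empty, loop returns (true, ov); B takes its first branch
        rw [if_pos hneg, PySem.List.pyRange_one_eq_nil (by omega)]
        simp [pvALoop]
      · -- 1 ≤ max_var ≤ 3: the range is nonempty, use the loop characterisation
        rw [if_neg hneg, if_neg h3]
        have hne : PySem.List.pyRange 1 (max_var + 1) 1 ≠ [] := by
          have : (1 : Int) ∈ PySem.List.pyRange 1 (max_var + 1) 1 := by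
            rw [PySem.List.mem_pyRange_one]; omega
          intro hnil; rw [hnil] at this; exact absurd this (List.not_mem_nil)
        rw [pvALoop_eq_filter old_recipes target_week _ _ (Or.inr hne)]
        simp [List.all_map, Function.comp_def, PySem.Set.mem_ofList]
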